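-- pv_equiv track=rewrite | github.com/yirufang2001/MLE_prep | AlertSystem.py | detect_alerts
-- ===== SOURCE A (Python) =====
-- from typing import Iterable, Any
--
-- def detect_alerts(stream: Iterable[Any], anomaly_label: Any = "anomaly", threshold: int = 3) -> bool:
--     stream = iter(stream)
--     curr_c =0
--     for event in stream:
--         if event == anomaly_label:
--             curr_c +=1
--             if curr_c >=threshold:
--                 return True
--         else:
--             curr_c = 0
--     return False
--
--
--
--     """
--     Return True if anomaly_label appears threshold times in a row.
--     :param stream: iterable of labels or event dicts
--     :param anomaly_label: the label that counts as anomaly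
--     :param threshold: consecutive count needed to trigger
--     :return: bool
--     """
--
--     # TODO: implement consecutive counter
--     # - If event is dict, read label from event.get("label") or event.get("type")
--     raise NotImplementedError
-- ===== SOURCE B (Python) =====
-- def detect_alerts(stream, anomaly_label="anomaly", threshold=3):
--     events = list(stream)
--     need = max(threshold, 1)
--     bounds = [-1] + [i for i, e in enumerate(events) if e != anomaly_label] + [len(events)]
--     return any(b - a - 1 >= need for a, b in zip(bounds, bounds[1:]))
-- ===== Notes on version B (the rewrite author's own statement) =====
-- stated objective: alternative
-- what changed: B replaces A's one-pass running reset counter by a boundary-index representation: it records the positions of non-matching events, brackets them with -1 and len(stream), and reports True iff some gap between consecutive boundaries is at least max(threshold, 1) (at least one anomaly must occur, matching A for threshold <= 0).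
import Mathlib
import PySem

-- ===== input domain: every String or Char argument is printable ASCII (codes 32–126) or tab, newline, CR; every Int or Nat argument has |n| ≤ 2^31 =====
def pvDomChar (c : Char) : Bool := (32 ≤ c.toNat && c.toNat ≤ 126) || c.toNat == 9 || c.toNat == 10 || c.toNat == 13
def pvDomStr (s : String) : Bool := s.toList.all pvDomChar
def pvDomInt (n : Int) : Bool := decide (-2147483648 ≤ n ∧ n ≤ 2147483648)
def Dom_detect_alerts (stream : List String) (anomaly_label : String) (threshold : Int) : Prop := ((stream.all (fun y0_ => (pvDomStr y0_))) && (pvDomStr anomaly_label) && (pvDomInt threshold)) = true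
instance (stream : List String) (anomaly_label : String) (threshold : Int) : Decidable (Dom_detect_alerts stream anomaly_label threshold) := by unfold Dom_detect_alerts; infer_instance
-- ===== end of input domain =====

-- B replaces A's running reset counter by boundary positions of non-matching events and checks the gaps between consecutive boundaries (alternative algorithm, same cost); equivalence proved on all inputs.

-- ===== PORT A =====
-- A's loop with mutable counter curr_c and early return, as structural recursion.
def detectAlertsGo (anomaly_label : String) (threshold : Int) : List String → Int → Bool
  | [], _ => false
  | e :: rest, curr_c =>
    if e == anomaly_label then
      if curr_c + 1 ≥ threshold then true
      else detectAlertsGo anomaly_label threshold rest (curr_c + 1)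
    else detectAlertsGo anomaly_label threshold rest 0

def detect_alerts (stream : List String) (anomaly_label : String) (threshold : Int) : Bool :=
  detectAlertsGo anomaly_label threshold stream 0

-- ===== PORT B =====
-- [i for i, e in enumerate(events) if e != anomaly_label]
def mismFrom (anomaly_label : String) : Int → List String → List Int
  | _, [] => []
  | i, e :: rest =>
    if e == anomaly_label then mismFrom anomaly_label (i + 1) rest
    else i :: mismFrom anomaly_label (i + 1) rest

def detect_alerts_alt (stream : List String) (anomaly_label : String) (threshold : Int) : Bool :=
  let need : Int := max threshold 1
  let bounds : List Int := [-1] ++ mismFrom anomaly_label 0 stream ++ [(stream.length : Int)]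
  (bounds.zip (bounds.drop 1)).any (fun p => decide (p.2 - p.1 - 1 ≥ need))

-- ===== PRECONDITION & SPEC =====
def Spec_detect_alerts (stream : List String) (anomaly_label : String) (threshold : Int) (out : Bool) : Prop := out = detect_alerts_alt stream anomaly_label threshold
instance (stream : List String) (anomaly_label : String) (threshold : Int) (out : Bool) : Decidable (Spec_detect_alerts stream anomaly_label threshold out) := by unfold Spec_detect_alerts; infer_instance

-- ===== CLAIM (what is proved, stated in full; the proofs are below) =====
def Claim_equal_detect_alerts : Prop := ∀ (stream : List String) (anomaly_label : String) (threshold : Int), Dom_detect_alerts stream anomaly_label threshold → Spec_detect_alerts stream anomaly_label threshold (detect_alerts stream anomaly_label threshold)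

-- ===== LEMMAS AND PROOFS =====

-- (leading match-run length, lengths of the following runs, zeros included), as Ints
def runsP (al : String) : List String → Int × List Int
  | [] => (0, [])
  | x :: xs =>
    let p := runsP al xs
    if x == al then (p.1 + 1, p.2) else (0, p.1 :: p.2)

theorem runsP_fst_nonneg (al : String) (xs : List String) : 0 ≤ (runsP al xs).1 := by
  induction xs with
  | nil => simp [runsP]
  | cons x xs ih =>
    by_cases hx : (x == al) = true <;> simp [runsP, hx] <;> try omega

-- gap lengths between consecutive boundaries a :: l ++ [n]
def gapsL : Int → List Int → Int → List Int
  | a, [], n => [n - a - 1]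
  | a, b :: l, n => (b - a - 1) :: gapsL b l n

theorem zip_any_gaps (f : Int → Bool) (l : List Int) (a n : Int) :
    (((a :: (l ++ [n])).zip (l ++ [n])).any (fun p => f (p.2 - p.1 - 1)))
      = (gapsL a l n).any f := by
  induction l generalizing a with
  | nil => simp [gapsL]
  | cons b l ih => simp [gapsL, List.zip, ← ih b]

theorem gapsL_lower (l : List Int) (a n : Int) :
    gapsL (a - 1) l n = match gapsL a l n with
      | [] => []
      | g :: gs => (g + 1) :: gs := by
  cases l with
  | nil => simp [gapsL]; ring
  | cons b l => simp [gapsL]; ring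

theorem mism_gaps (al : String) (xs : List String) (a : Int) :
    gapsL a (mismFrom al (a + 1) xs) (a + 1 + xs.length)
      = (runsP al xs).1 :: (runsP al xs).2 := by
  induction xs generalizing a with
  | nil => simp [mismFrom, gapsL, runsP]
  | cons x xs ih =>
    by_cases hx : (x == al) = true
    · have h1 := ih (a + 1)
      have h2 := gapsL_lower (mismFrom al (a + 1 + 1) xs) (a + 1) (a + 1 + 1 + xs.length)
      rw [h1] at h2
      have hn : a + 1 + ((x :: xs).length : Int) = a + 1 + 1 + (xs.length : Int) := by
        simp [List.length_cons]; ring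
      simp only [mismFrom, hx, if_pos, runsP, hn]
      have ha : a + 1 - 1 = a := by ring
      rw [ha] at h2
      simp [h2]
    · have h1 := ih (a + 1)
      have hn : a + 1 + ((x :: xs).length : Int) = a + 1 + 1 + (xs.length : Int) := by
        simp [List.length_cons]; ring
      simp only [mismFrom, hx, runsP, hn]
      simp [gapsL, h1]

theorem go_char (al : String) (th : Int) (xs : List String) (c : Int) :
    detectAlertsGo al th xs c
      = (decide (1 ≤ (runsP al xs).1 ∧ th ≤ c + (runsP al xs).1)
          || (runsP al xs).2.any (fun r => decide (max th 1 ≤ r))) := by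
  induction xs generalizing c with
  | nil => simp [detectAlertsGo, runsP]
  | cons x xs ih =>
    have hnn := runsP_fst_nonneg al xs
    by_cases hx : (x == al) = true
    · by_cases hth : th ≤ c + 1
      · have : (1 ≤ (runsP al xs).1 + 1 ∧ th ≤ c + ((runsP al xs).1 + 1)) := by omega
        simp [detectAlertsGo, runsP, hx, hth, this]
      · have hiff : (1 ≤ (runsP al xs).1 ∧ th ≤ c + 1 + (runsP al xs).1)
            ↔ (1 ≤ (runsP al xs).1 + 1 ∧ th ≤ c + ((runsP al xs).1 + 1)) := by omega
        simp only [detectAlertsGo, runsP, hx, if_pos, if_neg (by omega : ¬ c + 1 ≥ th), ih]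
        simp [hiff]
    · have e1 : decide (1 ≤ (runsP al xs).1 ∧ th ≤ 0 + (runsP al xs).1)
          = decide (max th 1 ≤ (runsP al xs).1) := by
        simp only [decide_eq_decide]; omega
      have e2 : decide (1 ≤ (0:Int) ∧ th ≤ c + 0) = false := by simp
      simp only [detectAlertsGo, hx, Bool.false_eq_true, if_false, ih 0, e1, runsP,
        List.any_cons, e2, Bool.false_or]

-- ===== VERDICT (by name: the statement is the Claim_ definition above) =====
theorem detect_alerts_spec : Claim_equal_detect_alerts := by
  intro stream al th _
  unfold Spec_detect_alerts detect_alerts detect_alerts_alt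
  dsimp only
  have hz := zip_any_gaps (fun g => decide (g ≥ max th 1)) (mismFrom al 0 stream) (-1) (stream.length : Int)
  have hm := mism_gaps al stream (-1)
  have h0 : (-1 : Int) + 1 = 0 := by ring
  rw [h0] at hm
  have hn : (0 : Int) + (stream.length : Int) = (stream.length : Int) := by ring
  rw [hn] at hm
  simp only [List.cons_append, List.nil_append, List.drop_succ_cons, List.drop_zero] at *
  rw [go_char]
  rw [hz, hm, List.any_cons]
  have e1 : decide (1 ≤ (runsP al stream).1 ∧ th ≤ 0 + (runsP al stream).1)
      = decide ((runsP al stream).1 ≥ max th 1) := by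
    simp only [decide_eq_decide]; omega
  simp only [e1, ge_iff_le]
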